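-- pv_equiv track=rewrite | github.com/OnchainAlpha/cmc-comments | autocrypto_social_bot/utils/anti_detection.py | _apply_intelligent_filtering
-- ===== SOURCE A (Python) =====
-- from typing import List, Dict, Optional, Tuple
--
-- def _apply_intelligent_filtering(proxies: List[str]) -> List[str]:
--     """Apply intelligent filtering to prioritize higher-quality free proxies"""
--     filtered = []
--
--     # Prioritize certain IP ranges that are less likely to be blocked
--     priority_ranges = [
--         '45.', '104.', '159.', '167.', '178.', '185.', '188.',  # Premium hosting
--         '73.', '74.', '75.', '76.',  # US residential-style
--         '94.', '95.', '212.', '213.',  # EU residential-style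
--     ]
--
--     # Avoid problematic ranges
--     avoid_ranges = [
--         '172.67.', '104.16.', '104.17.', '104.18.',  # Cloudflare
--         '185.199.', '140.82.', '192.30.',  # GitHub/CDN
--         '1.', '14.', '27.', '36.', '42.', '43.',  # Asian datacenter blocks
--     ]
--
--     for proxy in proxies:
--         ip = proxy.split(':')[0]
--
--         # Skip avoided ranges
--         if any(ip.startswith(avoid) for avoid in avoid_ranges):
--             continue
--
--         # Prioritize good ranges
--         if any(ip.startswith(priority) for priority in priority_ranges):
--             filtered.append(proxy)
--         elif len(filtered) < 200:  # Include others if we need more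
--             filtered.append(proxy)
--
--     return filtered[:100]  # Return top 100
-- ===== SOURCE B (Python) =====
-- def _apply_intelligent_filtering(proxies):
--     """Same selection as A: the priority tier is inert for the output (the first
--     100 appends always happen while len(filtered) < 200), so only the avoid
--     filter and the [:100] cut matter; stop as soon as 100 survivors are found."""
--     avoid = ('172.67.', '104.16.', '104.17.', '104.18.',
--              '185.199.', '140.82.', '192.30.',
--              '1.', '14.', '27.', '36.', '42.', '43.')
--     out = []
--     for proxy in proxies:
--         if not proxy.split(':')[0].startswith(avoid):
--             out.append(proxy)
--             if len(out) == 100: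
--                 break
--     return out
-- ===== Notes on version B (the rewrite author's own statement) =====
-- stated objective: simpler
-- what changed: B drops the priority_ranges list and the two-tier append branch entirely (they never affect the returned first 100) and keeps only the avoid-prefix filter, appending survivors and stopping as soon as 100 are collected instead of scanning the whole list and slicing [:100].
import Mathlib
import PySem

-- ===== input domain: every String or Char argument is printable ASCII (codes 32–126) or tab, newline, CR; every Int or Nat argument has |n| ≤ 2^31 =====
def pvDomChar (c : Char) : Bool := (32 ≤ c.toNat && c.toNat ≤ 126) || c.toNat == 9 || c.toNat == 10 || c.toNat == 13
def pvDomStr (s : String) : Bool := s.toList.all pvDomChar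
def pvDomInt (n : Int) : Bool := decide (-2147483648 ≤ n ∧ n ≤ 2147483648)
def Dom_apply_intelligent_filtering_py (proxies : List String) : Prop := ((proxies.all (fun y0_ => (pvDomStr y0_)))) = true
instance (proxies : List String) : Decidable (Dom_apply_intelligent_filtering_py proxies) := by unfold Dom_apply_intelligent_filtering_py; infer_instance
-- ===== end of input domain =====

-- B drops A's inert priority tier (the first 100 appends always happen while len(filtered) < 200),
-- keeping only the avoid filter and stopping at 100 survivors: simpler, same output.

-- ===== PORT A =====
def pvA_priority_ranges : List String :=
  ["45.", "104.", "159.", "167.", "178.", "185.", "188.",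
   "73.", "74.", "75.", "76.",
   "94.", "95.", "212.", "213."]

def pvA_avoid_ranges : List String :=
  ["172.67.", "104.16.", "104.17.", "104.18.",
   "185.199.", "140.82.", "192.30.",
   "1.", "14.", "27.", "36.", "42.", "43."]

-- the loop body of A; `proxy.split(':')[0]` is the head of the split (split never returns an empty list)
def pvA_loop (proxies : List String) (filtered : List String) : List String :=
  match proxies with
  | [] => filtered
  | proxy :: rest =>
    let ip := ((PySem.Str.split? proxy ":").getD []).headD ""
    if pvA_avoid_ranges.any (fun avoid => PySem.Str.startswith ip avoid) then
      pvA_loop rest filtered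
    else if pvA_priority_ranges.any (fun priority => PySem.Str.startswith ip priority) then
      pvA_loop rest (filtered ++ [proxy])
    else if filtered.length < 200 then
      pvA_loop rest (filtered ++ [proxy])
    else
      pvA_loop rest filtered

def apply_intelligent_filtering_py (proxies : List String) : List String :=
  PySem.List.slice (pvA_loop proxies []) none (some 100)   -- filtered[:100]

-- ===== PORT B =====
def pvB_avoid : List String :=
  ["172.67.", "104.16.", "104.17.", "104.18.",
   "185.199.", "140.82.", "192.30.",
   "1.", "14.", "27.", "36.", "42.", "43."]

-- B's loop: append non-avoided proxies, break as soon as 100 are collected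
def pvB_loop (proxies : List String) (out : List String) : List String :=
  match proxies with
  | [] => out
  | proxy :: rest =>
    if !(pvB_avoid.any (fun a => PySem.Str.startswith (((PySem.Str.split? proxy ":").getD []).headD "") a)) then
      let out' := out ++ [proxy]
      if out'.length == 100 then out' else pvB_loop rest out'
    else
      pvB_loop rest out

def apply_intelligent_filtering_py_alt (proxies : List String) : List String :=
  pvB_loop proxies []

-- ===== PRECONDITION & SPEC =====
def Spec_apply_intelligent_filtering_py (proxies : List String) (out : List String) : Prop := out = apply_intelligent_filtering_py_alt proxies
instance (proxies : List String) (out : List String) : Decidable (Spec_apply_intelligent_filtering_py proxies out) := by unfold Spec_apply_intelligent_filtering_py; infer_instance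

-- ===== CLAIM (what is proved, stated in full; the proofs are below) =====
def Claim_equal_apply_intelligent_filtering_py : Prop := ∀ (proxies : List String), Dom_apply_intelligent_filtering_py proxies → Spec_apply_intelligent_filtering_py proxies (apply_intelligent_filtering_py proxies)

-- ===== LEMMAS AND PROOFS =====

-- shared condition: proxy's ip starts with one of the avoid prefixes (both avoid lists are the same literal)
def pvAvoided (p : String) : Bool :=
  pvA_avoid_ranges.any (fun a => PySem.Str.startswith (((PySem.Str.split? p ":").getD []).headD "") a)

-- the proxies that survive the avoid filter (proof-side characterisation)
def pvKeep (proxies : List String) : List String :=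
  proxies.filter (fun p => !pvAvoided p)

lemma pvKeep_cons_pos (p : String) (ps : List String) (h : pvAvoided p = true) :
    pvKeep (p :: ps) = pvKeep ps := by
  unfold pvKeep
  rw [List.filter_cons, if_neg (by simp [h])]

lemma pvKeep_cons_neg (p : String) (ps : List String) (h : ¬ pvAvoided p = true) :
    pvKeep (p :: ps) = p :: pvKeep ps := by
  unfold pvKeep
  rw [List.filter_cons, if_pos (by simp [Bool.eq_false_iff.mpr h])]

lemma take_append_of_ge {α : Type} (l x : List α) (n : Nat) (h : n ≤ l.length) :
    (l ++ x).take n = l.take n := by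
  simp [List.take_append, Nat.sub_eq_zero_of_le h]

lemma pvA_loop_take (proxies : List String) : ∀ (acc : List String),
    (pvA_loop proxies acc).take 100 = (acc ++ pvKeep proxies).take 100 := by
  induction proxies with
  | nil => intro acc; simp [pvA_loop, pvKeep]
  | cons p ps ih =>
    intro acc
    rw [pvA_loop]
    show (if pvAvoided p = true then pvA_loop ps acc
          else if (pvA_priority_ranges.any fun priority =>
                    PySem.Str.startswith (((PySem.Str.split? p ":").getD []).headD "") priority) = true then
            pvA_loop ps (acc ++ [p])
          else if acc.length < 200 then pvA_loop ps (acc ++ [p]) else pvA_loop ps acc).take 100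
        = (acc ++ pvKeep (p :: ps)).take 100
    by_cases hav : pvAvoided p = true
    · rw [if_pos hav, ih, pvKeep_cons_pos p ps hav]
    · rw [if_neg hav, pvKeep_cons_neg p ps hav]
      have happ : acc ++ p :: pvKeep ps = (acc ++ [p]) ++ pvKeep ps := by simp
      by_cases hpr : (pvA_priority_ranges.any fun priority =>
          PySem.Str.startswith (((PySem.Str.split? p ":").getD []).headD "") priority) = true
      · rw [if_pos hpr, ih, happ]
      · rw [if_neg hpr]
        by_cases hlen : acc.length < 200
        · rw [if_pos hlen, ih, happ]
        · rw [if_neg hlen, ih]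
          have h100 : (100 : Nat) ≤ acc.length := by omega
          rw [take_append_of_ge acc _ 100 h100, take_append_of_ge acc _ 100 h100]

lemma pvB_loop_eq (proxies : List String) : ∀ (acc : List String), acc.length < 100 →
    pvB_loop proxies acc = (acc ++ pvKeep proxies).take 100 := by
  induction proxies with
  | nil =>
    intro acc h
    simp [pvB_loop, pvKeep, List.take_of_length_le (Nat.le_of_lt h)]
  | cons p ps ih =>
    intro acc h
    rw [pvB_loop]
    show (if (!pvAvoided p) = true then
            if ((acc ++ [p]).length == 100) = true then acc ++ [p] else pvB_loop ps (acc ++ [p])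
          else pvB_loop ps acc)
        = (acc ++ pvKeep (p :: ps)).take 100
    by_cases hav : pvAvoided p = true
    · rw [if_neg (by simp [hav]), ih acc h, pvKeep_cons_pos p ps hav]
    · rw [if_pos (by simp [Bool.eq_false_iff.mpr hav]), pvKeep_cons_neg p ps hav]
      have happ : acc ++ p :: pvKeep ps = (acc ++ [p]) ++ pvKeep ps := by simp
      by_cases h100 : ((acc ++ [p]).length == 100) = true
      · rw [if_pos h100, happ]
        have hlen : (acc ++ [p]).length = 100 := by simpa using h100
        rw [take_append_of_ge _ _ 100 (by omega), List.take_of_length_le (by omega)]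
      · rw [if_neg h100]
        have hlt : (acc ++ [p]).length < 100 := by
          have : (acc ++ [p]).length ≠ 100 := by simpa using h100
          simp at this ⊢; omega
        rw [ih _ hlt, happ]

-- ===== VERDICT (by name: the statement is the Claim_ definition above) =====
theorem apply_intelligent_filtering_py_spec : Claim_equal_apply_intelligent_filtering_py := by
  intro proxies _
  unfold Spec_apply_intelligent_filtering_py apply_intelligent_filtering_py apply_intelligent_filtering_py_alt
  rw [show ((100 : Int)) = ((100 : Nat) : Int) by norm_num, PySem.List.slice_to_natCast,
      pvA_loop_take, pvB_loop_eq proxies [] (by simp)]
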